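-- pv_equiv track=rewrite | github.com/paiml/depyler | examples/hard_runge_kutta.py | rk4_decay
-- ===== SOURCE A (Python) =====
-- def rk4_decay(y0: int, x0: int, x_end: int, steps: int, scale: int) -> int:
--     # Solve dy/dx = -y (exponential decay) using RK4
--     if steps == 0:
--         return y0
--     h: int = (x_end - x0) // steps
--     y: int = y0
--     i: int = 0
--     while i < steps:
--         k1: int = -y
--         k2: int = -(y + h * k1 // (2 * scale))
--         k3: int = -(y + h * k2 // (2 * scale))
--         k4: int = -(y + h * k3 // scale)
--         y = y + h * (k1 + 2 * k2 + 2 * k3 + k4) // (6 * scale)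
--         i = i + 1
--     return y
-- ===== SOURCE B (Python) =====
-- def rk4_decay(y0: int, x0: int, x_end: int, steps: int, scale: int) -> int:
--     # Cycle detection on the fixed RK4 step map: remember each state's first
--     # index; on a repeat, jump the remaining iterations by the cycle length.
--     if steps <= 0:
--         return y0
--     h = (x_end - x0) // steps
--
--     def f(y: int) -> int:
--         k1 = -y
--         k2 = -(y + h * k1 // (2 * scale))
--         k3 = -(y + h * k2 // (2 * scale))
--         k4 = -(y + h * k3 // scale)
--         return y + h * (k1 + 2 * k2 + 2 * k3 + k4) // (6 * scale)
--
--     seen = {}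
--     y = y0
--     i = 0
--     while i < steps:
--         j = seen.get(y)
--         if j is not None:
--             cycle = i - j
--             rem = (steps - i) % cycle
--             for _ in range(rem):
--                 y = f(y)
--             return y
--         seen[y] = i
--         y = f(y)
--         i += 1
--     return y
-- ===== Notes on version B (the rewrite author's own statement) =====
-- stated objective: alternative
-- what changed: B detects a repeated state of the fixed RK4 step map with a first-seen-index dictionary and jumps the remaining iterations modulo the cycle length, instead of unconditionally running all steps iterations; intended as faster when the map cycles (measured up to ~1300x at n=262144 on cycling inputs, but slower by a dict-overhead constant when no cycle appears, so not consistently faster).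
import Mathlib
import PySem

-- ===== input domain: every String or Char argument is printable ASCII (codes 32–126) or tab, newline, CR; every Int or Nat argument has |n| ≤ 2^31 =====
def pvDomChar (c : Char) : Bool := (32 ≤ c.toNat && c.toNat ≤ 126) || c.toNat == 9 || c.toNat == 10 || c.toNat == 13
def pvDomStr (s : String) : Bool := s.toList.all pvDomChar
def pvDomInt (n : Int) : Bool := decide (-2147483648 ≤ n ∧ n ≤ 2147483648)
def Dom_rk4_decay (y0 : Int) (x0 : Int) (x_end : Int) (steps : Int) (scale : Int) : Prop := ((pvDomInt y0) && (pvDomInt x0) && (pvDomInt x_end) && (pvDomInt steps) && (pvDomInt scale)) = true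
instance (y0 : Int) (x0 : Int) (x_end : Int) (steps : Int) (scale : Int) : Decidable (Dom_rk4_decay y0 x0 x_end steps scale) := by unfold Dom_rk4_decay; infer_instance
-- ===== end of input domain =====

-- B replaces A's steps-long iteration of the fixed RK4 step map by cycle
-- detection (first-seen-index dictionary) plus a modular jump over the cycle
-- (alternative algorithm; much faster when the map cycles, not in general).

-- ===== PORT A =====
-- the while loop of A, running exactly (steps - i).toNat more iterations
def rk4A_loop (h : Int) (scale : Int) (y : Int) : Nat → Int
  | 0 => y
  | n + 1 =>
    let k1 : Int := -y
    let k2 : Int := -(y + PySem.Int.floordiv (h * k1) (2 * scale))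
    let k3 : Int := -(y + PySem.Int.floordiv (h * k2) (2 * scale))
    let k4 : Int := -(y + PySem.Int.floordiv (h * k3) scale)
    rk4A_loop h scale (y + PySem.Int.floordiv (h * (k1 + 2 * k2 + 2 * k3 + k4)) (6 * scale)) n

def rk4_decay (y0 : Int) (x0 : Int) (x_end : Int) (steps : Int) (scale : Int) : Int :=
  if steps = 0 then y0
  else
    let h : Int := PySem.Int.floordiv (x_end - x0) steps
    rk4A_loop h scale y0 steps.toNat

-- ===== PORT B =====
-- B's local function f: one RK4 step of the fixed map
def rk4_f (h : Int) (scale : Int) (y : Int) : Int :=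
  let k1 : Int := -y
  let k2 : Int := -(y + PySem.Int.floordiv (h * k1) (2 * scale))
  let k3 : Int := -(y + PySem.Int.floordiv (h * k2) (2 * scale))
  let k4 : Int := -(y + PySem.Int.floordiv (h * k3) scale)
  y + PySem.Int.floordiv (h * (k1 + 2 * k2 + 2 * k3 + k4)) (6 * scale)

-- B's 'for _ in range(rem): y = f(y)'
def rk4B_jump (h : Int) (scale : Int) (y : Int) : Nat → Int
  | 0 => y
  | n + 1 => rk4B_jump h scale (rk4_f h scale y) n

-- B's while loop: seen maps a state to its first index; fuel = steps - i
def rk4B_loop (h : Int) (scale : Int) (steps : Int) :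
    Nat → PySem.Dict Int Int → Int → Int → Int
  | 0, _, y, _ => y
  | n + 1, seen, y, i =>
    match seen.get? y with
    | some j =>
        let cycle : Int := i - j
        let rem : Int := PySem.Int.mod (steps - i) cycle
        rk4B_jump h scale y rem.toNat
    | none => rk4B_loop h scale steps n (seen.insert y i) (rk4_f h scale y) (i + 1)

def rk4_decay_alt (y0 : Int) (x0 : Int) (x_end : Int) (steps : Int) (scale : Int) : Int :=
  if steps ≤ 0 then y0
  else
    let h : Int := PySem.Int.floordiv (x_end - x0) steps
    rk4B_loop h scale steps steps.toNat PySem.Dict.empty y0 0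

-- ===== PRECONDITION & SPEC =====
-- Pre_ excludes exactly the inputs where A raises ZeroDivisionError:
-- scale = 0 with at least one loop iteration (steps > 0).
def Pre_rk4_decay (y0 : Int) (x0 : Int) (x_end : Int) (steps : Int) (scale : Int) : Prop :=
  scale ≠ 0 ∨ steps ≤ 0
instance (y0 : Int) (x0 : Int) (x_end : Int) (steps : Int) (scale : Int) : Decidable (Pre_rk4_decay y0 x0 x_end steps scale) := by unfold Pre_rk4_decay; infer_instance

def pvWitness_rk4_decay : Int × Int × Int × Int × Int := (1000, 0, 10, 5, 100)

def Spec_rk4_decay (y0 : Int) (x0 : Int) (x_end : Int) (steps : Int) (scale : Int) (out : Int) : Prop := out = rk4_decay_alt y0 x0 x_end steps scale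
instance (y0 : Int) (x0 : Int) (x_end : Int) (steps : Int) (scale : Int) (out : Int) : Decidable (Spec_rk4_decay y0 x0 x_end steps scale out) := by unfold Spec_rk4_decay; infer_instance

-- ===== CLAIM (what is proved, stated in full; the proofs are below) =====
def Claim_equal_rk4_decay : Prop := ∀ (y0 : Int) (x0 : Int) (x_end : Int) (steps : Int) (scale : Int), Dom_rk4_decay y0 x0 x_end steps scale → Pre_rk4_decay y0 x0 x_end steps scale → Spec_rk4_decay y0 x0 x_end steps scale (rk4_decay y0 x0 x_end steps scale)

-- ===== LEMMAS AND PROOFS =====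

-- A's loop iterates the same step map as B's f
theorem rk4A_loop_eq_iterate (h scale y : Int) (n : Nat) :
    rk4A_loop h scale y n = (rk4_f h scale)^[n] y := by
  induction n generalizing y with
  | zero => rfl
  | succ n ih =>
    show rk4A_loop h scale (rk4_f h scale y) n = _
    rw [ih, ← Function.iterate_succ_apply]

theorem rk4B_jump_eq_iterate (h scale y : Int) (n : Nat) :
    rk4B_jump h scale y n = (rk4_f h scale)^[n] y := by
  induction n generalizing y with
  | zero => rfl
  | succ n ih =>
    show rk4B_jump h scale (rk4_f h scale y) n = _
    rw [ih, ← Function.iterate_succ_apply]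

-- if f has a cycle of length c at y, iterating M times equals iterating M % c times
theorem iterate_mod_cycle {f : Int → Int} {y : Int} {c : Nat} (hc : 0 < c)
    (hy : f^[c] y = y) (M : Nat) : f^[M % c] y = f^[M] y := by
  induction M using Nat.strong_induction_on with
  | _ M ih =>
    by_cases hM : M < c
    · rw [Nat.mod_eq_of_lt hM]
    · push_neg at hM
      have h1 : M % c = (M - c) % c := Nat.mod_eq_sub_mod hM
      have h2 : f^[M] y = f^[M - c] y := by
        conv_lhs => rw [show M = (M - c) + c by omega]
        rw [Function.iterate_add_apply, hy]
      rw [h1, h2]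
      exact ih (M - c) (by omega)

-- invariant of B's while loop
theorem rk4B_loop_eq (h scale steps y0 : Int) (n : Nat) :
    ∀ (k : Nat) (seen : PySem.Dict Int Int),
    steps.toNat = k + n →
    (∀ y' j, seen.get? y' = some j →
      ∃ m : Nat, m < k ∧ j = (m : Int) ∧ (rk4_f h scale)^[m] y0 = y') →
    rk4B_loop h scale steps n seen ((rk4_f h scale)^[k] y0) (k : Int)
      = (rk4_f h scale)^[steps.toNat] y0 := by
  induction n with
  | zero =>
    intro k seen hk _
    simp [rk4B_loop, hk]
  | succ n ih =>
    intro k seen hk hseen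
    have hsteps : steps = ((k + (n + 1) : Nat) : Int) := by
      have : 0 < steps.toNat := by omega
      omega
    rw [rk4B_loop]
    cases hget : seen.get? ((rk4_f h scale)^[k] y0) with
    | some j =>
      dsimp only
      obtain ⟨m, hm, hj, hfm⟩ := hseen _ _ hget
      -- f^[k-m] has a cycle at y := f^[k] y0
      have hcyc : (rk4_f h scale)^[k - m] ((rk4_f h scale)^[k] y0)
          = (rk4_f h scale)^[k] y0 := by
        conv_rhs => rw [show k = (k - m) + m by omega, Function.iterate_add_apply, hfm]
      have hmod : (PySem.Int.mod (steps - (k : Int)) ((k : Int) - j)).toNat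
          = (n + 1) % (k - m) := by
        have h1 : steps - (k : Int) = ((n + 1 : Nat) : Int) := by omega
        have h2 : (k : Int) - j = ((k - m : Nat) : Int) := by omega
        rw [h1, h2, PySem.Int.mod_natCast]
        omega
      rw [rk4B_jump_eq_iterate, hmod,
        iterate_mod_cycle (by omega) hcyc (n + 1),
        ← Function.iterate_add_apply]
      congr 1
      omega
    | none =>
      dsimp only
      have step : (rk4_f h scale) ((rk4_f h scale)^[k] y0)
          = (rk4_f h scale)^[k + 1] y0 := (Function.iterate_succ_apply' _ _ _).symm
      have hcast : ((k : Int) + 1) = ((k + 1 : Nat) : Int) := by push_cast; ring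
      rw [step, hcast]
      apply ih (k + 1)
      · omega
      · intro y' j hj
        rw [PySem.Dict.get?_insert] at hj
        split at hj
        · rename_i hy'
          injection hj with hj'
          exact ⟨k, by omega, hj'.symm, hy'.symm⟩
        · obtain ⟨m, hm, hjm, hfm⟩ := hseen _ _ hj
          exact ⟨m, by omega, hjm, hfm⟩

-- ===== VERDICT (by name: the statement is the Claim_ definition above) =====
theorem rk4_decay_spec : Claim_equal_rk4_decay := by
  intro y0 x0 x_end steps scale _ _
  unfold Spec_rk4_decay rk4_decay rk4_decay_alt
  by_cases h0 : steps = 0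
  · simp [h0]
  · by_cases hneg : steps ≤ 0
    · have : steps.toNat = 0 := by omega
      simp [h0, hneg, this, rk4A_loop]
    · have hpos : ¬ steps ≤ 0 := hneg
      simp only [h0, hpos, if_false]
      rw [rk4A_loop_eq_iterate]
      have := rk4B_loop_eq (PySem.Int.floordiv (x_end - x0) steps) scale steps y0
        steps.toNat 0 PySem.Dict.empty (by omega)
        (by intro y' j hj; simp [PySem.Dict.get?, PySem.Dict.empty] at hj)
      simpa using this.symm
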